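-- pv_equiv track=rewrite | github.com/yeseong31/coding-test | 프로그래머스/unrated/121683. ［PCCP 모의고사 #1］ 외톨이 알파벳/［PCCP 모의고사 #1］ 외톨이 알파벳.py | solution
-- ===== SOURCE A (Python) =====
-- from collections import defaultdict
--
-- def solution(input_string):
--     answer = []
--     prev = ''
--     dic = defaultdict(int)
--
--     for v in input_string:
--         if prev == v:
--             continue
--         dic[v] += 1
--         prev = v
--
--     for k in dic.keys():
--         if dic[k] >= 2:
--             answer.append(k)
--
--     return ''.join(sorted(answer)) if answer else 'N'
-- ===== SOURCE B (Python) =====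
-- def solution(input_string):
--     # A char is a loner iff, after jumping to its first occurrence and stripping
--     # that first run, it still occurs later in the string.
--     lonely = sorted(c for c in set(input_string)
--                     if c in input_string[input_string.index(c):].lstrip(c))
--     return ''.join(lonely) if lonely else 'N'
-- ===== Notes on version B (the rewrite author's own statement) =====
-- stated objective: alternative
-- what changed: Instead of collapsing consecutive runs and counting runs per character, B tests each distinct character directly: jump to its first occurrence with str.index, strip that run with lstrip, and check whether the character reappears; no run list and no counts are built.
import Mathlib
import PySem

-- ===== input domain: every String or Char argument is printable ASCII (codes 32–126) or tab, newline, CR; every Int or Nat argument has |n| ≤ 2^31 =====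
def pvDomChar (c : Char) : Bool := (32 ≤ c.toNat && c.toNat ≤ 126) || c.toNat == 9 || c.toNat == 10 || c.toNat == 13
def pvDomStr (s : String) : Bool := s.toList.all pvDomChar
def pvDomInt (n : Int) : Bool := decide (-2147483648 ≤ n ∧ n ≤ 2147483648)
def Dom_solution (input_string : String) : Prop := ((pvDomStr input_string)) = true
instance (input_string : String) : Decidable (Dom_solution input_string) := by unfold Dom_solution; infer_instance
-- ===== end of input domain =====

-- B drops A's run-collapsing count entirely: for each distinct char it jumps to the
-- first occurrence, strips that run, and checks whether the char reappears (alternative).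

-- ===== PORT A =====
def solution (input_string : String) : String :=
  let st := input_string.toList.foldl
    (fun (acc : String × PySem.Dict Char Int) v =>
      if acc.1 == String.ofList [v] then acc
      else (String.ofList [v], acc.2.modify v 0 (· + 1)))
    ("", PySem.Dict.empty)
  let dic := st.2
  let answer := dic.keys.foldl
    (fun ans k => if 2 ≤ dic.getD k 0 then ans ++ [k] else ans) []
  if answer ≠ [] then String.ofList (PySem.List.sorted answer (fun x => x) false) else "N"

-- ===== PORT B =====
-- c ranges over set(input_string), so input_string.index(c) exists and
-- input_string[input_string.index(c):] is exactly dropWhile (x != c); .lstrip(c)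
-- (strip-set {c}) is exactly dropWhile (x == c); 'c in …' is List.contains.
def solution_alt (input_string : String) : String :=
  let l := input_string.toList
  let lonely := PySem.List.sorted
    ((PySem.Set.ofList l).filter
      (fun c => ((l.dropWhile (fun x => x != c)).dropWhile (fun x => x == c)).contains c))
    (fun x => x) false
  if lonely ≠ [] then String.ofList lonely else "N"

-- ===== PRECONDITION & SPEC =====
def Spec_solution (input_string : String) (out : String) : Prop := out = solution_alt input_string
instance (input_string : String) (out : String) : Decidable (Spec_solution input_string out) := by unfold Spec_solution; infer_instance

-- ===== CLAIM (what is proved, stated in full; the proofs are below) =====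
def Claim_equal_solution : Prop := ∀ (input_string : String), Dom_solution input_string → Spec_solution input_string (solution input_string)

-- ===== LEMMAS AND PROOFS =====

-- the keys of A's consecutive-dedup loop: first element of each maximal run
def runsZ : Option Char → List Char → List Char
  | _, [] => []
  | p, h :: t => if p = some h then runsZ p t else h :: runsZ (some h) t

def encPrev : Option Char → String
  | none => ""
  | some c => String.ofList [c]

lemma encPrev_eq_iff (prev : Option Char) (v : Char) :
    (encPrev prev == String.ofList [v]) = true ↔ prev = some v := by
  cases prev with
  | none =>
    simp only [encPrev, beq_iff_eq]
    constructor
    · intro h; have := congrArg String.toList h; simp at this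
    · intro h; simp at h
  | some c =>
    simp only [encPrev, beq_iff_eq, Option.some.injEq]
    constructor
    · intro h; have := congrArg String.toList h; simpa using this
    · intro h; rw [h]

-- A's first loop, with the dict step abstracted over the run-key list
lemma loopA (chars : List Char) (prev : Option Char) (d : PySem.Dict Char Int) :
    (chars.foldl
      (fun (acc : String × PySem.Dict Char Int) v =>
        if acc.1 == String.ofList [v] then acc
        else (String.ofList [v], acc.2.modify v 0 (· + 1)))
      (encPrev prev, d)).2
    = (runsZ prev chars).foldl (fun d x => d.modify x 0 (· + 1)) d := by
  induction chars generalizing prev d with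
  | nil => simp [runsZ]
  | cons c rest ih =>
    by_cases h : prev = some c
    · subst h
      have hb : (encPrev (some c) == String.ofList [c]) = true := by rw [encPrev_eq_iff]
      simp only [List.foldl_cons, hb, if_true, runsZ]
      exact ih (some c) d
    · have hb : (encPrev prev == String.ofList [c]) = false := by
        rw [Bool.eq_false_iff]
        intro hc; exact h ((encPrev_eq_iff prev c).mp hc)
      simp only [List.foldl_cons, hb, Bool.false_eq_true, if_false, runsZ, if_neg h]
      exact ih (some c) (d.modify c 0 (· + 1))

-- the previous-char state does not affect the count of a char it differs from
lemma count_runs_prev (c : Char) (t : List Char) (p : Option Char) (hp : p ≠ some c) :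
    ((runsZ p t).count c) = ((runsZ none t).count c) := by
  cases t with
  | nil => rfl
  | cons h t =>
    by_cases hph : p = some h
    · have hhc : h ≠ c := by intro e; exact hp (e ▸ hph)
      simp [runsZ, hph, hhc]
    · simp [runsZ, if_neg hph]

-- a char heads at least one run iff it occurs at all
lemma one_run_iff_mem (c : Char) (t : List Char) :
    1 ≤ ((runsZ none t).count c) ↔ c ∈ t := by
  induction t with
  | nil => simp [runsZ]
  | cons h t ih =>
    by_cases hhc : h = c
    · subst hhc
      simp [runsZ]
    · rw [show runsZ none (h :: t) = h :: runsZ (some h) t from by simp [runsZ]]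
      rw [List.count_cons]
      simp only [hhc, beq_iff_eq, if_false]
      rw [count_runs_prev c t (some h) (by simp [hhc])]
      simp [ih, Ne.symm hhc]

-- inside a c-run, a NEW c-run starts in t iff c survives stripping the leading c's
lemma new_run_iff (c : Char) (t : List Char) :
    1 ≤ ((runsZ (some c) t).count c) ↔ c ∈ t.dropWhile (fun x => x == c) := by
  induction t with
  | nil => simp [runsZ]
  | cons h t ih =>
    by_cases hhc : h = c
    · subst hhc
      simp only [runsZ, List.dropWhile_cons, beq_self_eq_true, if_true]
      exact ih
    · have h1 : runsZ (some c) (h :: t) = h :: runsZ (some h) t := by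
        rw [show runsZ (some c) (h :: t)
              = if some c = some h then runsZ (some c) t else h :: runsZ (some h) t from rfl,
            if_neg (by simp [Ne.symm hhc])]
      rw [h1]
      have hm : c ∈ runsZ none t ↔ c ∈ t :=
        (List.count_pos_iff.symm).trans (one_run_iff_mem c t)
      simp [count_runs_prev c t (some h) (by simp [hhc]),
        hm, Ne.symm hhc, hhc]

-- MAIN: c heads ≥ 2 runs of l  ⟺  c reappears after its first run is stripped
lemma two_runs_iff (c : Char) (l : List Char) :
    2 ≤ ((runsZ none l).count c) ↔
      c ∈ (l.dropWhile (fun x => x != c)).dropWhile (fun x => x == c) := by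
  induction l with
  | nil => simp [runsZ]
  | cons h t ih =>
    by_cases hhc : h = c
    · subst hhc
      rw [show runsZ none (h :: t) = h :: runsZ (some h) t from by simp [runsZ]]
      rw [List.count_cons]
      simp only [beq_self_eq_true, if_true]
      rw [show (2 : Nat) ≤ (runsZ (some h) t).count h + 1 ↔ 1 ≤ (runsZ (some h) t).count h from by omega]
      rw [new_run_iff]
      simp
    · rw [show runsZ none (h :: t) = h :: runsZ (some h) t from by simp [runsZ]]
      rw [List.count_cons]
      simp only [hhc, beq_iff_eq, if_false, add_zero]
      rw [count_runs_prev c t (some h) (by simp [hhc])]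
      rw [ih]
      simp [hhc]

-- the run keys have the same first-occurrence dedup as the list itself
lemma ofList_runs_aux (t : List Char) (p : Option Char) (acc : List Char)
    (hp : ∀ x, p = some x → x ∈ acc) :
    List.foldl PySem.Set.add acc (runsZ p t) = List.foldl PySem.Set.add acc t := by
  induction t generalizing p acc with
  | nil => rfl
  | cons h t ih =>
    by_cases hph : p = some h
    · have hmem : h ∈ acc := hp h hph
      have hadd : PySem.Set.add acc h = acc := by
        simp [PySem.Set.add, PySem.Set.contains, hmem]
      rw [show runsZ p (h :: t) = runsZ p t from by simp [runsZ, hph]]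
      rw [List.foldl_cons, hadd]
      exact ih p acc hp
    · rw [show runsZ p (h :: t) = h :: runsZ (some h) t from by simp [runsZ, hph]]
      rw [List.foldl_cons, List.foldl_cons]
      exact ih (some h) (PySem.Set.add acc h)
        (by intro x hx; cases hx; exact (PySem.Set.mem_add _ _ _).mpr (Or.inr rfl))

lemma ofList_runs (l : List Char) :
    PySem.Set.ofList (runsZ none l) = PySem.Set.ofList l := by
  rw [PySem.Set.ofList_eq_foldl, PySem.Set.ofList_eq_foldl]
  exact ofList_runs_aux l none [] (by intro x hx; cases hx)

-- ===== VERDICT (by name: the statement is the Claim_ definition above) =====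
theorem solution_spec : Claim_equal_solution := by
  intro s _
  show solution s = solution_alt s
  unfold solution solution_alt
  simp only []
  rw [show ("" : String) = encPrev none from rfl, loopA]
  rw [← PySem.Dict.counter_eq_foldl]
  rw [PySem.List.foldl_append_ite_eq_filter]
  rw [PySem.Dict.keys_counter, ofList_runs]
  rw [List.nil_append]
  have hfc : ((PySem.Set.ofList s.toList).filter
        (fun k => decide (2 ≤ (PySem.Dict.counter (runsZ none s.toList)).getD k 0)))
      = ((PySem.Set.ofList s.toList).filter
        (fun c => ((s.toList.dropWhile (fun x => x != c)).dropWhile (fun x => x == c)).contains c)) := by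
    apply List.filter_congr
    intro x _
    rw [PySem.Dict.getD_counter]
    have h2 : ((2:Int) ≤ ((runsZ none s.toList).count x : Int)) ↔
        x ∈ (s.toList.dropWhile (fun y => y != x)).dropWhile (fun y => y == x) := by
      rw [← two_runs_iff]
      exact ⟨fun h => by exact_mod_cast h, fun h => by exact_mod_cast h⟩
    simp [h2]
  rw [hfc]
  simp only [ne_eq, PySem.List.sorted_eq_nil_iff]
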